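-- pv_equiv track=rewrite | github.com/lqsullivan/cryptopals | s01_c08.py | count_repetitions
-- ===== SOURCE A (Python) =====
-- def count_repetitions(input, n=4):
--     blocks = [input[i:i+n] for i in range(0, len(input), n)]
--
--     count = {}
--
--     # get counts
--     for b in blocks:
--         if b in count.keys():
--             count[b] += 1
--         else:
--             count[b] = 1
--
--     return count
-- ===== SOURCE B (Python) =====
-- def count_repetitions(input, n=4):
--     blocks = []
--     if n > 0:
--         i = 0
--         while i < len(input):
--             blocks.append(input[i:i+n])
--             i += n
--
--     def group(bs):
--         if not bs:
--             return {}
--         h = bs[0]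
--         rest = bs[1:]
--         same = [b for b in rest if b == h]
--         out = {h: 1 + len(same)}
--         out.update(group([b for b in rest if b != h]))
--         return out
--
--     return group(blocks)
-- ===== Notes on version B (the rewrite author's own statement) =====
-- stated objective: alternative
-- what changed: Replaces the incremental dict-counting loop by recursive partition grouping: chunk with an explicit while loop, then repeatedly take the first block, count its duplicates by filtering them out, and recurse on the remaining (different) blocks.
import Mathlib
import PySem

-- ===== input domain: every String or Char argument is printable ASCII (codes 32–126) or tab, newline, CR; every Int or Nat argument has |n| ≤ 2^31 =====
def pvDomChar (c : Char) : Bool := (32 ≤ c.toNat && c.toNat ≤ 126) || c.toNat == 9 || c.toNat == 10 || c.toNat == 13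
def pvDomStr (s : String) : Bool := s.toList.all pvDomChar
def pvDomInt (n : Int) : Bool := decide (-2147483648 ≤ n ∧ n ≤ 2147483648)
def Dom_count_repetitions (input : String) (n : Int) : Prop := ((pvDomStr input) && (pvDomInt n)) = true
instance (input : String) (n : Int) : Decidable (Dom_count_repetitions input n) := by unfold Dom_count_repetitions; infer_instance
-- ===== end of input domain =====

-- B replaces A's incremental dict-counting loop by recursive partition grouping
-- (take the first block, count its duplicates by filtering, recurse on the rest);
-- a genuinely different decomposition, not claimed faster.

-- ===== PORT A =====
def count_repetitions (input : String) (n : Int) : List (String × Int) :=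
  -- blocks = [input[i:i+n] for i in range(0, len(input), n)]
  let blocks := (PySem.List.pyRange 0 (PySem.Str.len input) n).map
      (fun i => PySem.Str.slice input (some i) (some (i + n)))
  -- for b in blocks: if b in count.keys(): count[b] += 1 else: count[b] = 1
  let count := blocks.foldl
      (fun d b => if PySem.Dict.contains d b then d.insert b (d.getD b 0 + 1) else d.insert b 1)
      (PySem.Dict.empty : PySem.Dict String Int)
  count.items

-- ===== PORT B =====
-- 'if n > 0: while i < len(input): blocks.append(input[i:i+n]); i += n'
-- (the while loop as structural recursion on a step counter; each iteration moves i
--  forward by n ≥ 1, so len(input) iterations always suffice)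
def pvChunksAux (input : String) (n : Int) : Nat → Int → List String
  | 0, _ => []
  | Nat.succ f, i =>
    if 0 < n ∧ i < PySem.Str.len input then
      PySem.Str.slice input (some i) (some (i + n)) :: pvChunksAux input n f (i + n)
    else []

def pvChunks (input : String) (n : Int) : List String :=
  pvChunksAux input n input.toList.length 0

-- def group(bs): take the head block, count its duplicates, recurse on the distinct rest
-- (structural recursion on a length bound; the recursive list is a strict sublist)
def pvGroupAux : Nat → List String → PySem.Dict String Int
  | 0, _ => PySem.Dict.empty
  | _, [] => PySem.Dict.empty
  | Nat.succ f, h :: rest =>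
    let same := rest.filter (fun b => b == h)
    let out := (PySem.Dict.empty : PySem.Dict String Int).insert h (1 + (same.length : Int))
    out.update (pvGroupAux f (rest.filter (fun b => b != h))).items

def pvGroup (bs : List String) : PySem.Dict String Int := pvGroupAux bs.length bs

def count_repetitions_alt (input : String) (n : Int) : List (String × Int) :=
  (pvGroup (pvChunks input n)).items

-- ===== PRECONDITION & SPEC =====
-- Pre_ excludes exactly n = 0, where Python's range(0, len(input), 0) raises ValueError.
def Pre_count_repetitions (input : String) (n : Int) : Prop := n ≠ 0
instance (input : String) (n : Int) : Decidable (Pre_count_repetitions input n) := by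
  unfold Pre_count_repetitions; infer_instance

def pvWitness_count_repetitions : String × Int := ("abcdabcd", 4)

def Spec_count_repetitions (input : String) (n : Int) (out : List (String × Int)) : Prop :=
  out = count_repetitions_alt input n
instance (input : String) (n : Int) (out : List (String × Int)) : Decidable (Spec_count_repetitions input n out) := by
  unfold Spec_count_repetitions; infer_instance

-- ===== CLAIM (what is proved, stated in full; the proofs are below) =====
def Claim_equal_count_repetitions : Prop := ∀ (input : String) (n : Int),
  Dom_count_repetitions input n → Pre_count_repetitions input n →
  Spec_count_repetitions input n (count_repetitions input n)

-- ===== LEMMAS AND PROOFS =====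

-- A positive-step range, one step at a time.
theorem pyRange_pos_cons (a b s : Int) (hs : 0 < s) (hab : a < b) :
    PySem.List.pyRange a b s = a :: PySem.List.pyRange (a + s) b s := by
  rw [PySem.List.pyRange_of_pos _ _ hs, PySem.List.pyRange_of_pos _ _ hs]
  have hcount : ((b - a + s - 1) / s).toNat = ((b - (a + s) + s - 1) / s).toNat + 1 := by
    have h1 : b - a + s - 1 = (b - (a + s) + s - 1) + 1 * s := by ring
    rw [h1, Int.add_mul_ediv_right _ _ (by omega : s ≠ 0)]
    have h2 : 0 ≤ b - (a + s) + s - 1 := by omega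
    have h3 : 0 ≤ (b - (a + s) + s - 1) / s := Int.ediv_nonneg h2 (by omega)
    omega
  simp only [if_pos hab, hcount]
  by_cases hb : a + s < b
  · simp only [if_pos hb, List.range_succ_eq_map, List.map_cons, List.map_map,
      Nat.cast_zero, mul_zero, add_zero]
    congr 1
    apply List.map_congr_left; intro k _
    simp only [Function.comp, Nat.succ_eq_add_one]
    push_cast; ring
  · have h0 : (b - (a + s) + s - 1) / s = 0 :=
      Int.ediv_eq_zero_of_lt (by omega) (by omega)
    simp [h0]

-- A's block list equals B's while-loop chunker (positive step).
theorem chunks_aux_eq (input : String) (n : Int) (hn : 0 < n) :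
    ∀ (f : Nat) (i : Int), (PySem.Str.len input - i).toNat ≤ f →
    (PySem.List.pyRange i (PySem.Str.len input) n).map
      (fun j => PySem.Str.slice input (some j) (some (j + n))) = pvChunksAux input n f i := by
  intro f
  induction f with
  | zero =>
    intro i hf
    have hge : PySem.Str.len input ≤ i := by omega
    rw [pvChunksAux, PySem.List.pyRange_of_pos _ _ hn, if_neg (by omega)]
    rfl
  | succ f ih =>
    intro i hf
    rw [pvChunksAux]
    by_cases hi : i < PySem.Str.len input
    · rw [if_pos ⟨hn, hi⟩, pyRange_pos_cons _ _ _ hn hi, List.map_cons]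
      congr 1
      exact ih (i + n) (by omega)
    · rw [if_neg (by omega), PySem.List.pyRange_of_pos _ _ hn, if_neg hi]
      rfl

-- Set.add of an already-present element is a no-op on the fold.
theorem foldl_add_filter_ne (rest : List String) (h : String) :
    ∀ (s : PySem.Set String), h ∈ s →
      rest.foldl PySem.Set.add s = (rest.filter (fun b => b != h)).foldl PySem.Set.add s := by
  induction rest with
  | nil => intro s _; rfl
  | cons b bs ih =>
    intro s hs
    by_cases hb : b = h
    · subst hb
      have hadd : PySem.Set.add s b = s := by
        simp [PySem.Set.add, hs]
      simp only [List.foldl_cons, List.filter_cons, bne_self_eq_false, hadd]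
      exact ih s hs
    · have hne : (b != h) = true := by simp [hb]
      simp only [List.foldl_cons, List.filter_cons, hne, if_pos]
      apply ih
      simp only [PySem.Set.add]
      split
      · exact hs
      · simp [hs]

-- Folding add from an accumulator headed by h, when no element equals h.
theorem foldl_add_head (l : List String) (h : String) :
    ∀ (acc : List String), (∀ x ∈ l, x ≠ h) →
      l.foldl PySem.Set.add (h :: acc) = h :: l.foldl PySem.Set.add acc := by
  induction l with
  | nil => intro acc _; rfl
  | cons b bs ih =>
    intro acc hl
    have hbh : b ≠ h := hl b (by simp)
    have hrest : ∀ x ∈ bs, x ≠ h := fun x hx => hl x (by simp [hx])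
    by_cases hm : b ∈ acc
    · have e1 : PySem.Set.add (h :: acc) b = h :: acc := by
        simp [PySem.Set.add, hm]
      have e2 : PySem.Set.add acc b = acc := by
        simp [PySem.Set.add, hm]
      simp only [List.foldl_cons, e1, e2]
      exact ih acc hrest
    · have e1 : PySem.Set.add (h :: acc) b = h :: (acc ++ [b]) := by
        simp [PySem.Set.add, hm, hbh]
      have e2 : PySem.Set.add acc b = acc ++ [b] := by
        simp [PySem.Set.add, hm]
      simp only [List.foldl_cons, e1, e2]
      exact ih (acc ++ [b]) hrest

-- First-occurrence dedup, one distinct element at a time.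
theorem ofList_cons_filter (h : String) (rest : List String) :
    PySem.Set.ofList (h :: rest) = h :: PySem.Set.ofList (rest.filter (fun b => b != h)) := by
  show (h :: rest).foldl PySem.Set.add PySem.Set.empty = _
  rw [List.foldl_cons]
  have h1 : PySem.Set.add PySem.Set.empty h = [h] := by rfl
  rw [h1, foldl_add_filter_ne rest h [h] (by simp)]
  have h2 : ∀ x ∈ rest.filter (fun b => b != h), x ≠ h := by
    intro x hx
    have := List.of_mem_filter hx
    simpa using this
  rw [show ([h] : List String) = h :: ([] : List String) by rfl]
  exact foldl_add_head _ h [] h2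

-- Updating a dict with pairs whose keys are fresh and distinct appends them.
theorem items_update_disjoint (ps : List (String × Int)) :
    ∀ (d : PySem.Dict String Int), (ps.map Prod.fst).Nodup →
      (∀ p ∈ ps, p.1 ∉ d.keys) → (d.update ps).items = d.items ++ ps := by
  induction ps with
  | nil => intro d _ _; simp [PySem.Dict.update]
  | cons p rest ih =>
    intro d hnd hfresh
    have hc : d.contains p.1 = false := by
      rw [Bool.eq_false_iff]
      intro hcon
      exact hfresh p (by simp) ((PySem.Dict.contains_iff_mem_keys d p.1).mp hcon)
    have hins : (d.insert p.1 p.2).items = d.items ++ [p] := by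
      simp [PySem.Dict.insert, hc]
    show ((d.insert p.1 p.2).update rest).items = d.items ++ p :: rest
    rw [ih (d.insert p.1 p.2) (by simpa using hnd.of_cons)]
    · rw [hins]; simp
    · intro q hq
      simp only [PySem.Dict.keys, hins, List.map_append, List.mem_append]
      rintro (hq1 | hq2)
      · exact hfresh q (by simp [hq]) hq1
      · simp only [List.map_cons, List.map_nil, List.mem_cons, List.not_mem_nil, or_false] at hq2
        have := (List.nodup_cons.mp hnd).1
        exact this (hq2 ▸ List.mem_map_of_mem hq)

-- B's recursive grouping returns exactly Counter(bs) as items.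
theorem pvGroupAux_items : ∀ (f : Nat) (bs : List String), bs.length ≤ f →
    (pvGroupAux f bs).items = (PySem.Set.ofList bs).map (fun k => (k, (bs.count k : Int))) := by
  intro f
  induction f with
  | zero =>
    intro bs hf
    have : bs = [] := List.length_eq_zero_iff.mp (by omega)
    subst this; rfl
  | succ f ih =>
    intro bs hf
    match bs with
    | [] => rfl
    | h :: rest =>
      rw [pvGroupAux]
      set diff := rest.filter (fun b => b != h) with hdiff
      have hdlen : diff.length ≤ f := by
        rw [hdiff]
        have := List.length_filter_le (fun b => b != h) rest
        simp only [List.length_cons] at hf; omega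
      have hIH := ih diff hdlen
      have hd0 : ((PySem.Dict.empty : PySem.Dict String Int).insert h
          (1 + ((rest.filter (fun b => b == h)).length : Int))).items
          = [(h, 1 + ((rest.filter (fun b => b == h)).length : Int))] := by rfl
      have hfst : ((pvGroupAux f diff).items.map Prod.fst) = PySem.Set.ofList diff := by
        have hcomp : (Prod.fst ∘ fun k : String => (k, (List.count k diff : Int)))
            = fun k : String => k := rfl
        rw [hIH, List.map_map, hcomp, List.map_id']
      have hmemdiff : ∀ k ∈ PySem.Set.ofList diff, k ≠ h := by
        intro k hk
        have hkd : k ∈ diff := by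
          have := PySem.Set.mem_ofList diff k
          tauto
        have := List.of_mem_filter hkd
        simpa using this
      show ((((PySem.Dict.empty : PySem.Dict String Int).insert h _).update
          (pvGroupAux f diff).items)).items = _
      rw [items_update_disjoint (pvGroupAux f diff).items _
          (by rw [hfst]; exact PySem.Set.nodup_ofList diff)
          (by intro p hp
              have hp1 : p.1 ∈ PySem.Set.ofList diff := by
                rw [← hfst]; exact List.mem_map_of_mem hp
              simp only [PySem.Dict.keys, hd0]
              simp [hmemdiff p.1 hp1])]
      rw [hd0, hIH, ofList_cons_filter, List.map_cons, List.singleton_append]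
      congr 1
      · -- head pair
        have hcc : (h :: rest).count h = rest.count h + 1 := by simp
        have hcnt : rest.count h = (rest.filter (fun b => b == h)).length := by
          rw [List.count_eq_length_filter]
        rw [hcc, hcnt]
        refine congrArg (Prod.mk h) ?_
        push_cast
        ring
      · -- tail pairs
        apply List.map_congr_left
        intro k hk
        have hkh : k ≠ h := hmemdiff k hk
        have h1 : (h :: rest).count k = rest.count k := by
          rw [List.count_cons]
          simp [Ne.symm hkh]
        have h2 : diff.count k = rest.count k := by
          rw [hdiff]
          exact List.count_filter (by simp [hkh])
        rw [h1, ← h2]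

-- ===== VERDICT (by name: the statement is the Claim_ definition above) =====
theorem count_repetitions_spec : Claim_equal_count_repetitions := by
  intro input n _ hn
  unfold Pre_count_repetitions at hn
  unfold Spec_count_repetitions count_repetitions count_repetitions_alt
  simp only []
  set blocks := (PySem.List.pyRange 0 (PySem.Str.len input) n).map
      (fun i => PySem.Str.slice input (some i) (some (i + n))) with hb
  have hcongr : blocks.foldl
      (fun d b => if PySem.Dict.contains d b then d.insert b (d.getD b 0 + 1) else d.insert b 1)
      (PySem.Dict.empty : PySem.Dict String Int)
      = blocks.foldl (fun d b => d.insert b (d.getD b 0 + 1)) PySem.Dict.empty := by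
    apply PySem.List.foldl_congr_mem
    intro d b _
    by_cases h : PySem.Dict.contains d b
    · simp [h]
    · have h0 : d.getD b 0 = 0 :=
        PySem.Dict.getD_of_not_contains d 0 (by simpa using h)
      simp [h, h0]
  have hlen0 : PySem.Str.len input = (input.toList.length : Int) := PySem.Str.len_eq input
  rw [hcongr, PySem.Dict.foldl_insert_getD_add_one_eq_counter, PySem.Dict.items_counter]
  unfold pvGroup
  rw [pvGroupAux_items (pvChunks input n).length (pvChunks input n) le_rfl]
  by_cases hpos : 0 < n
  · rw [hb]
    unfold pvChunks
    rw [chunks_aux_eq input n hpos input.toList.length 0 (by rw [PySem.Str.len_eq]; omega)]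
  · have hneg : n < 0 := by omega
    have hr : PySem.List.pyRange 0 (PySem.Str.len input) n = [] := by
      simp only [PySem.List.pyRange, if_neg (show ¬ n = 0 by omega)]
      rw [if_neg (by omega), if_neg (by omega)]
      rfl
    have hch : pvChunks input n = [] := by
      unfold pvChunks
      cases hl : input.toList.length with
      | zero => rfl
      | succ m => rw [pvChunksAux, if_neg (by omega)]
    rw [hb, hr, hch]
    rfl
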